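-- pv_equiv track=rewrite | github.com/YoungChanShin/codingtest | programmers/2019_KAKAO/무지의 먹방라이브/03.py | solution
-- ===== SOURCE A (Python) =====
-- def solution(food_times, k):
--     n = len(food_times)
--     s = 0
--     sorted_food = []
--     for i in range(n):
--         sorted_food.append([i+1,food_times[i]])
--         s += food_times[i]
--     if k >= s:
--         return -1
--     sorted_food.sort(key=lambda x: (x[1]))
--     height = 0
--     i = 0
--     while i < n:
--         while k - (n-i) >= 0 and height < sorted_food[i][1]:
--             height += 1
--             k -= n-i
--
--         if k - (n-i) < 0 and height < sorted_food[i][1]: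
--             ret = sorted_food[i:]
--             ret.sort(key=lambda x: x[0])
--             return ret[k][0]
--         offset = 1
--         while i+offset < n and sorted_food[i][1] == sorted_food[i+offset][1]:
--             offset += 1
--         i += offset
--     return -1
-- ===== SOURCE B (Python) =====
-- def solution(food_times, k):
--     s = sum(food_times)
--     if k >= s:
--         return -1
--     n = len(food_times)
--     pairs = sorted(([i + 1, food_times[i]] for i in range(n)), key=lambda p: p[1])
--     prev = 0
--     for j in range(n):
--         t = pairs[j][1]
--         if prev < t:
--             chunk = (t - prev) * (n - j)
--             if k < chunk:
--                 rem = sorted(pairs[j:], key=lambda p: p[0])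
--                 return rem[k % (n - j)][0]
--             k -= chunk
--             prev = t
--     return -1
-- ===== Notes on version B (the rewrite author's own statement) =====
-- stated objective: faster
-- what changed: B replaces A's one-second-at-a-time simulation (inner while loop incrementing 'height' once per consumed second) by a single pass over the sorted times that subtracts each distinct time level as one arithmetic chunk (t-prev)*(remaining) and finds the answer with one modulus; intended as faster (A is O(n log n + k)), measured 1.55x at the largest size both finished.
import Mathlib
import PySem

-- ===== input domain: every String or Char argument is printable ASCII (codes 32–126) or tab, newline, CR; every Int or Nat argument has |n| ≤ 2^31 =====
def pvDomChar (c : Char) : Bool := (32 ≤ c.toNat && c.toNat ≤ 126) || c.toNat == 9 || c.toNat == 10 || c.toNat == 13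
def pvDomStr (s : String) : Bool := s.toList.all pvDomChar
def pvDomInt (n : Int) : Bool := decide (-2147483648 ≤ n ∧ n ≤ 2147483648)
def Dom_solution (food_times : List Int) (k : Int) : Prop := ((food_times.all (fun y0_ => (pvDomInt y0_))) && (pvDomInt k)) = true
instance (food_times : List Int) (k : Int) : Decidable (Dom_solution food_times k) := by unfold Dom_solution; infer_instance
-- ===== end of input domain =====

-- B replaces A's one-second-at-a-time eating simulation by a single bulk-arithmetic pass
-- over the sorted times (intended as faster — A's loop runs once per consumed second;
-- a timing run measured B 1.55x faster at the largest size both finished).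

-- ===== PORT A =====
-- inner while: 'while k - (n-i) >= 0 and height < sorted_food[i][1]: height += 1; k -= n-i'
def aClimb (k height ni t : Int) : Int × Int :=
  if h : 0 ≤ k - ni ∧ height < t then aClimb (k - ni) (height + 1) ni t else (k, height)
  termination_by (t - height).toNat
  decreasing_by omega

-- offset while: 'while i+offset < n and sorted_food[i][1] == sorted_food[i+offset][1]: offset += 1'
def aOffset (sf : List (Int × Int)) (n i offset : Int) : Int :=
  if h : i + offset < n ∧ ((PySem.List.pyGet? sf i).getD (0,0)).2 = ((PySem.List.pyGet? sf (i + offset)).getD (0,0)).2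
  then aOffset sf n i (offset + 1) else offset
  termination_by (n - (i + offset)).toNat
  decreasing_by omega

-- needed by aOuter's termination proof
theorem aOffset_ge_aux (sf : List (Int × Int)) (n i : Int) : ∀ (g : Nat) (offset : Int),
    (n - (i + offset)).toNat ≤ g → offset ≤ aOffset sf n i offset := by
  intro g
  induction g with
  | zero =>
    intro offset hg
    rw [aOffset, dif_neg (by omega)]
  | succ g ih =>
    intro offset hg
    rw [aOffset]
    split
    · next h => exact le_trans (by omega) (ih (offset + 1) (by omega))
    · exact le_rfl

theorem aOffset_ge (sf : List (Int × Int)) (n i : Int) : ∀ offset, offset ≤ aOffset sf n i offset :=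
  fun offset => aOffset_ge_aux sf n i (n - (i + offset)).toNat offset le_rfl

-- outer while of A (i, k, height are the loop variables)
def aOuter (sf : List (Int × Int)) (n i k height : Int) : Int :=
  if hlt : i < n then
    let t := ((PySem.List.pyGet? sf i).getD (0,0)).2
    let kh := aClimb k height (n - i) t
    if kh.1 - (n - i) < 0 ∧ kh.2 < t then
      ((PySem.List.pyGet? (PySem.List.sorted (PySem.List.slice sf (some i) none) (fun x => x.1)) kh.1).getD (0,0)).1
    else
      aOuter sf n (i + aOffset sf n i 1) kh.1 kh.2
  else -1
  termination_by (n - i).toNat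
  decreasing_by have := aOffset_ge sf n i 1; omega

def solution (food_times : List Int) (k : Int) : Int :=
  let n : Int := (food_times.length : Int)
  let p := (PySem.List.pyRange 0 n).foldl
      (fun (acc : List (Int × Int) × Int) i =>
        (acc.1 ++ [(i + 1, (PySem.List.pyGet? food_times i).getD 0)],
         acc.2 + (PySem.List.pyGet? food_times i).getD 0)) ([], 0)
  if k ≥ p.2 then -1
  else
    let sf := PySem.List.sorted p.1 (fun x => x.2)
    aOuter sf n 0 k 0

-- ===== PORT B =====
-- 'for j in range(n)' loop of B: bulk-subtract one distinct level per step
def bLoop (pairs : List (Int × Int)) (n j k prev : Int) : Int :=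
  if h : j < n then
    let t := ((PySem.List.pyGet? pairs j).getD (0,0)).2
    if prev < t then
      let chunk := (t - prev) * (n - j)
      if k < chunk then
        ((PySem.List.pyGet? (PySem.List.sorted (PySem.List.slice pairs (some j) none) (fun x => x.1)) (PySem.Int.mod k (n - j))).getD (0,0)).1
      else bLoop pairs n (j + 1) (k - chunk) t
    else bLoop pairs n (j + 1) k prev
  else -1
  termination_by (n - j).toNat
  decreasing_by all_goals omega

def solution_alt (food_times : List Int) (k : Int) : Int :=
  let s := food_times.sum
  if k ≥ s then -1
  else
    let n : Int := (food_times.length : Int)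
    let pairs := PySem.List.sorted ((PySem.List.pyRange 0 n).map
        (fun i => (i + 1, (PySem.List.pyGet? food_times i).getD 0))) (fun x => x.2)
    bLoop pairs n 0 k 0

-- ===== PRECONDITION & SPEC =====
-- Pre_ excludes exactly the inputs where A raises IndexError (negative k below minus the
-- number of positive food times, with some positive time present and k below the total sum).
def Pre_solution (food_times : List Int) (k : Int) : Prop :=
  ¬(0 < food_times.countP (fun t => decide (0 < t)) ∧ k < food_times.sum ∧
    k + (food_times.countP (fun t => decide (0 < t)) : Int) < 0)
instance (food_times : List Int) (k : Int) : Decidable (Pre_solution food_times k) := by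
  unfold Pre_solution; infer_instance
def pvWitness_solution : List Int × Int := ([3, 1, 2], 5)


def Spec_solution (food_times : List Int) (k : Int) (out : Int) : Prop := out = solution_alt food_times k
instance (food_times : List Int) (k : Int) (out : Int) : Decidable (Spec_solution food_times k out) := by
  unfold Spec_solution; infer_instance

-- ===== CLAIM (what is proved, stated in full; the proofs are below) =====
def Claim_equal_solution : Prop := ∀ (food_times : List Int) (k : Int), Dom_solution food_times k → Pre_solution food_times k → Spec_solution food_times k (solution food_times k)

-- ===== LEMMAS AND PROOFS =====

theorem pyGetD_natD {α : Type} (xs : List α) (i : Nat) (d : α) :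
    (PySem.List.pyGet? xs (i : Int)).getD d = xs.getD i d := by
  rw [PySem.List.pyGet?_natCast, List.getD_eq_getElem?_getD]

theorem aClimb_stop (k h ni t : Int) (hc : ¬(0 ≤ k - ni ∧ h < t)) : aClimb k h ni t = (k, h) := by
  rw [aClimb, dif_neg hc]

theorem aClimb_full (ni t : Int) (hni : 0 < ni) : ∀ (g : Nat) (k h : Int), (t - h).toNat = g →
    h ≤ t → (t - h) * ni ≤ k → aClimb k h ni t = (k - (t - h) * ni, t) := by
  intro g
  induction g with
  | zero =>
    intro k h hg hle hk
    have ht : h = t := by omega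
    subst ht
    rw [aClimb_stop _ _ _ _ (by omega)]
    simp
  | succ g ih =>
    intro k h hg hle hk
    have hlt : h < t := by omega
    have hstep : ni ≤ (t - h) * ni := by nlinarith
    rw [aClimb, dif_pos ⟨by omega, hlt⟩]
    have e : (t - (h + 1)) * ni = (t - h) * ni - ni := by ring
    rw [ih (k - ni) (h + 1) (by omega) (by omega) (by linarith)]
    rw [Prod.mk.injEq]
    exact ⟨by omega, rfl⟩

theorem aClimb_partial (ni t : Int) (hni : 0 < ni) : ∀ (g : Nat) (k h : Int), k.toNat = g →
    0 ≤ k → h < t → k < (t - h) * ni → ∃ h', aClimb k h ni t = (k % ni, h') ∧ h' < t := by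
  intro g
  induction g using Nat.strong_induction_on with
  | _ g ih =>
    intro k h hg hk hlt hchunk
    by_cases hkni : k < ni
    · refine ⟨h, ?_, hlt⟩
      rw [aClimb_stop _ _ _ _ (by omega), Int.emod_eq_of_lt hk hkni]
    · push Not at hkni
      have h1 : h + 1 < t := by
        by_contra hc
        have ht : t - h = 1 := by omega
        rw [ht] at hchunk; omega
      have e : (t - (h + 1)) * ni = (t - h) * ni - ni := by ring
      obtain ⟨h', he, hh'⟩ := ih (k - ni).toNat (by omega) (k - ni) (h + 1) rfl (by omega) h1 (by omega)
      refine ⟨h', ?_, hh'⟩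
      rw [aClimb, dif_pos ⟨by omega, hlt⟩, he, Int.sub_emod_right]

theorem aOffset_spec_aux (sf : List (Int × Int)) (i : Nat) :
    ∀ (g off0 : Nat), 1 ≤ off0 → sf.length - (i + off0) ≤ g → i + off0 ≤ sf.length →
    (∀ m : Nat, m < off0 → (sf.getD (i + m) (0,0)).2 = (sf.getD i (0,0)).2) →
    ∃ off : Nat, aOffset sf (sf.length : Int) (i : Int) (off0 : Int) = (off : Int) ∧ off0 ≤ off ∧
      i + off ≤ sf.length ∧
      ∀ m : Nat, m < off → (sf.getD (i + m) (0,0)).2 = (sf.getD i (0,0)).2 := by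
  intro g
  induction g with
  | zero =>
    intro off0 h1 hg hle hall
    refine ⟨off0, ?_, le_rfl, hle, hall⟩
    rw [aOffset, dif_neg]
    intro hc
    have := hc.1
    omega
  | succ g ih =>
    intro off0 h1 hg hle hall
    rw [aOffset]
    by_cases hc : (i : Int) + (off0 : Int) < (sf.length : Int) ∧
        ((PySem.List.pyGet? sf (i : Int)).getD (0,0)).2 = ((PySem.List.pyGet? sf ((i : Int) + (off0 : Int))).getD (0,0)).2
    · rw [dif_pos hc]
      have hcast : ((i : Int) + (off0 : Int)) = ((i + off0 : Nat) : Int) := by push_cast; ring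
      have heq : (sf.getD (i + off0) (0,0)).2 = (sf.getD i (0,0)).2 := by
        have := hc.2
        rw [hcast, pyGetD_natD, pyGetD_natD] at this
        exact this.symm
      have hall' : ∀ m : Nat, m < off0 + 1 → (sf.getD (i + m) (0,0)).2 = (sf.getD i (0,0)).2 := by
        intro m hm
        by_cases hm0 : m < off0
        · exact hall m hm0
        · have : m = off0 := by omega
          subst this; exact heq
      obtain ⟨off, he, hge, hle', hall''⟩ := ih (off0 + 1) (by omega) (by omega) (by omega) hall'
      refine ⟨off, ?_, by omega, hle', hall''⟩
      rw [← he]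
      norm_num
    · rw [dif_neg hc]
      exact ⟨off0, rfl, le_rfl, hle, hall⟩

theorem aOffset_spec (sf : List (Int × Int)) (i : Nat) (hi : i < sf.length) :
    ∃ off : Nat, aOffset sf (sf.length : Int) (i : Int) 1 = (off : Int) ∧ 1 ≤ off ∧
      i + off ≤ sf.length ∧
      ∀ m : Nat, m < off → (sf.getD (i + m) (0,0)).2 = (sf.getD i (0,0)).2 := by
  have h := aOffset_spec_aux sf i (sf.length - (i + 1)) 1 le_rfl le_rfl (by omega)
    (by intro m hm; have : m = 0 := by omega
        subst this; simp)
  simpa using h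

theorem bLoop_skip (pairs : List (Int × Int)) : ∀ (off j : Nat) (k prev : Int),
    j + off ≤ pairs.length → (∀ m : Nat, m < off → (pairs.getD (j + m) (0,0)).2 ≤ prev) →
    bLoop pairs (pairs.length : Int) (j : Int) k prev = bLoop pairs (pairs.length : Int) ((j + off : Nat) : Int) k prev := by
  intro off
  induction off with
  | zero => intro j k prev _ _; rfl
  | succ off ih =>
    intro j k prev hle hall
    have hj : (j : Int) < (pairs.length : Int) := by
      have : j < pairs.length := by omega
      exact_mod_cast this
    rw [bLoop, dif_pos hj]
    have ht : ((PySem.List.pyGet? pairs (j : Int)).getD (0,0)).2 = (pairs.getD j (0,0)).2 := by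
      rw [pyGetD_natD]
    have hskip : ¬ prev < ((PySem.List.pyGet? pairs (j : Int)).getD (0,0)).2 := by
      rw [ht]
      have := hall 0 (by omega)
      simp only [Nat.add_zero] at this
      omega
    rw [if_neg hskip]
    have hcast : ((j : Int) + 1) = ((j + 1 : Nat) : Int) := by push_cast; ring
    rw [hcast, ih (j + 1) k prev (by omega) (by
      intro m hm
      have := hall (m + 1) (by omega)
      have e : j + 1 + m = j + (m + 1) := by omega
      rw [e]; exact this)]
    norm_num
    congr 1
    omega

theorem loop_eq (sf : List (Int × Int)) (hs : sf.Pairwise (fun a b => a.2 ≤ b.2)) :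
    ∀ (d i : Nat), sf.length - i ≤ d → i ≤ sf.length → ∀ (k h : Int),
    (0 ≤ k ∨ (h = 0 ∧ ((sf.drop i).countP (fun x => decide (0 < x.2)) = 0 ∨
        -(((sf.drop i).countP (fun x => decide (0 < x.2)) : Int)) ≤ k))) →
    aOuter sf (sf.length : Int) (i : Int) k h = bLoop sf (sf.length : Int) (i : Int) k h := by
  intro d
  induction d with
  | zero =>
    intro i hd hi k h _
    have : i = sf.length := by omega
    subst this
    rw [aOuter, dif_neg (by omega), bLoop, dif_neg (by omega)]
  | succ d ih =>
    intro i hd hi k h hinv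
    by_cases hil : i < sf.length
    case neg =>
      have : i = sf.length := by omega
      subst this
      rw [aOuter, dif_neg (by omega), bLoop, dif_neg (by omega)]
    have hiI : (i : Int) < (sf.length : Int) := by exact_mod_cast hil
    have hni : 0 < (sf.length : Int) - (i : Int) := by omega
    have hgetD : sf.getD i (0,0) = sf[i] := List.getD_eq_getElem sf (0,0) hil
    have hpair : (sf.drop i).Pairwise (fun a b => a.2 ≤ b.2) := hs.sublist (List.drop_sublist i sf)
    have hdropc : sf.drop i = sf[i] :: sf.drop (i+1) := List.drop_eq_getElem_cons hil
    have hsuffix : ∀ x ∈ sf.drop (i+1), sf[i].2 ≤ x.2 := by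
      rw [hdropc] at hpair
      exact (List.pairwise_cons.1 hpair).1
    rw [aOuter, dif_pos hiI]
    simp only [pyGetD_natD]
    by_cases hht : h < (sf.getD i (0,0)).2
    case neg =>
      -- A skips the whole equal-time group; B skips it one element at a time
      rw [aClimb_stop k h ((sf.length : Int) - (i : Int)) (sf.getD i (0,0)).2 (fun hc => hht hc.2)]
      dsimp only
      rw [if_neg (fun hc => hht hc.2)]
      obtain ⟨off, hoe, ho1, hole, hoall⟩ := aOffset_spec sf i hil
      rw [hoe, show ((i : Int) + (off : Int)) = ((i + off : Nat) : Int) by push_cast; ring]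
      have htle : ∀ m : Nat, m < off → (sf.getD (i + m) (0,0)).2 ≤ h := by
        intro m hm
        rw [hoall m hm]; omega
      have hinv' : 0 ≤ k ∨ (h = 0 ∧ ((sf.drop (i + off)).countP (fun x => decide (0 < x.2)) = 0 ∨
          -(((sf.drop (i + off)).countP (fun x => decide (0 < x.2)) : Int)) ≤ k)) := by
        rcases hinv with hk0 | ⟨h0, hdis⟩
        · exact Or.inl hk0
        · refine Or.inr ⟨h0, ?_⟩
          have htake0 : ((sf.drop i).take off).countP (fun x => decide (0 < x.2)) = 0 := by
            rw [List.countP_eq_zero]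
            intro a ha
            obtain ⟨m, hm, hma⟩ := List.mem_iff_getElem.1 ha
            have hm' : m < off := by
              have := hm
              simp [List.length_take] at this
              omega
            have hidx : i + m < sf.length := by
              have := hm
              simp [List.length_take, List.length_drop] at this
              omega
            have : a = sf[i + m] := by
              rw [← hma, List.getElem_take, List.getElem_drop]
            have ha2 : a.2 ≤ h := by
              rw [this, ← List.getD_eq_getElem sf (0,0) hidx]
              exact htle m hm'
            simp only [decide_eq_true_eq]
            omega
          have hsplit : (sf.drop i).countP (fun x => decide (0 < x.2)) =
              ((sf.drop i).take off).countP (fun x => decide (0 < x.2)) +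
              (sf.drop (i + off)).countP (fun x => decide (0 < x.2)) := by
            conv_lhs => rw [← List.take_append_drop off (sf.drop i)]
            rw [List.countP_append, List.drop_drop]
          rw [hsplit, htake0] at hdis
          simpa using hdis
      rw [ih (i + off) (by omega) (by omega) k h hinv']
      exact (bLoop_skip sf off i k h (by omega) htle).symm
    case pos =>
      by_cases hk : 0 ≤ k
      · by_cases hkc : k < ((sf.getD i (0,0)).2 - h) * ((sf.length : Int) - (i : Int))
        · -- both return from this group
          obtain ⟨h', hcl, hh'⟩ := aClimb_partial _ _ hni k.toNat k h rfl hk hht hkc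
          rw [hcl]
          dsimp only
          have hmlt := Int.emod_lt_of_pos k hni
          rw [if_pos ⟨by omega, hh'⟩]
          rw [bLoop, dif_pos hiI]
          simp only [pyGetD_natD]
          rw [if_pos hht, if_pos hkc, PySem.Int.mod_eq_emod_of_pos hni]
        · -- A eats the whole level, B subtracts the chunk
          push Not at hkc
          rw [aClimb_full _ _ hni (((sf.getD i (0,0)).2) - h).toNat k h rfl (le_of_lt hht) hkc]
          dsimp only
          rw [if_neg (fun hc => lt_irrefl _ hc.2)]
          obtain ⟨off, hoe, ho1, hole, hoall⟩ := aOffset_spec sf i hil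
          rw [hoe, show ((i : Int) + (off : Int)) = ((i + off : Nat) : Int) by push_cast; ring]
          have hchpos : 0 < ((sf.getD i (0,0)).2 - h) * ((sf.length : Int) - (i : Int)) :=
            mul_pos (by omega) hni
          conv_rhs => rw [bLoop]
          rw [dif_pos hiI]
          simp only [pyGetD_natD]
          rw [if_pos hht, if_neg (not_lt.2 hkc)]
          rw [show ((i : Int) + 1) = ((i + 1 : Nat) : Int) by push_cast; ring]
          rw [ih (i + off) (by omega) (by omega) _ _ (Or.inl (by omega))]
          have hskip := bLoop_skip sf (off - 1) (i + 1)
            (k - ((sf.getD i (0,0)).2 - h) * ((sf.length : Int) - (i : Int))) ((sf.getD i (0,0)).2)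
            (by omega) (by
              intro m hm
              have := hoall (m + 1) (by omega)
              rw [show i + 1 + m = i + (m + 1) by omega, this])
          rw [show i + 1 + (off - 1) = i + off by omega] at hskip
          exact hskip.symm
      · -- negative k: A wraps the index, B takes the Python modulus: same element
        push Not at hk
        rcases hinv with hk0 | ⟨h0, hdis⟩
        · omega
        subst h0
        have ht0 : 0 < (sf.getD i (0,0)).2 := hht
        have hcnt : (sf.drop i).countP (fun x => decide (0 < x.2)) = (sf.drop i).length := by
          rw [List.countP_eq_length]
          intro a ha
          rw [hdropc] at ha
          rcases List.mem_cons.1 ha with rfl | ha'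
          · simpa using by rw [← hgetD]; exact ht0
          · have := hsuffix a ha'
            simp only [decide_eq_true_eq]
            rw [← hgetD] at this
            omega
        rw [hcnt, List.length_drop] at hdis
        have hbound : -(((sf.length - i : Nat) : Int)) ≤ k := by
          rcases hdis with h0' | hb
          · omega
          · exact hb
        have hkL : -((sf.length : Int) - (i : Int)) ≤ k := by
          push_cast at hbound
          omega
        rw [aClimb_stop k 0 ((sf.length : Int) - (i : Int)) (sf.getD i (0,0)).2
          (fun hc => absurd hc.1 (by omega))]
        dsimp only
        rw [if_pos ⟨by omega, hht⟩]
        rw [bLoop, dif_pos hiI]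
        simp only [pyGetD_natD]
        have hchpos : 0 < ((sf.getD i (0,0)).2 - 0) * ((sf.length : Int) - (i : Int)) :=
          mul_pos (by omega) hni
        rw [if_pos hht, if_pos (by omega)]
        have hmod : PySem.Int.mod k ((sf.length : Int) - (i : Int)) =
            k + ((sf.length : Int) - (i : Int)) := by
          rw [PySem.Int.mod_eq_emod_of_pos hni]
          have h1 := Int.add_mul_emod_self_left k ((sf.length : Int) - (i : Int)) 1
          rw [mul_one] at h1
          rw [← h1, Int.emod_eq_of_lt (by omega) (by omega)]
        rw [hmod]
        have hretlen : (PySem.List.sorted (PySem.List.slice sf (some (i : Int)) none)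
            (fun x => x.1)).length = sf.length - i := by
          rw [PySem.List.length_sorted, PySem.List.slice_from_natCast, List.length_drop]
        have hm1 : 0 < (-k).toNat := by omega
        have hm2 : (-k).toNat ≤ (PySem.List.sorted (PySem.List.slice sf (some (i : Int)) none)
            (fun x => x.1)).length := by
          rw [hretlen]; omega
        rw [show k = -(((-k).toNat : Nat) : Int) by omega]
        rw [PySem.List.pyGet?_neg_natCast _ _ hm1 hm2]
        rw [show -((((-k).toNat : Nat) : Int)) + ((sf.length : Int) - (i : Int)) =
            ((sf.length - i - (-k).toNat : Nat) : Int) by omega]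
        rw [PySem.List.pyGet?_natCast]
        rw [hretlen]

theorem map_getD_range {α : Type} (xs : List α) (d : α) :
    (List.range xs.length).map (fun i => xs.getD i d) = xs := by
  apply List.ext_getElem
  · simp
  · intro n h1 h2
    simp [List.getD_eq_getElem?_getD, List.getElem?_eq_getElem h2]

-- ===== VERDICT (by name: the statement is the Claim_ definition above) =====
theorem build_eq (ft : List Int) :
    ((PySem.List.pyRange 0 (ft.length : Int)).foldl
      (fun (acc : List (Int × Int) × Int) i =>
        (acc.1 ++ [(i + 1, (PySem.List.pyGet? ft i).getD 0)],
         acc.2 + (PySem.List.pyGet? ft i).getD 0)) ([], 0)) =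
    ((List.range ft.length).map (fun i : Nat => ((i : Int) + 1, ft.getD i 0)), ft.sum) := by
  rw [PySem.List.pyRange_zero_natCast, List.foldl_map]
  rw [PySem.List.foldl_prod_mk
    (f := fun (a : List (Int × Int)) (i : Nat) => a ++ [((i : Int) + 1, (PySem.List.pyGet? ft (i : Int)).getD 0)])
    (g := fun (a : Int) (i : Nat) => a + (PySem.List.pyGet? ft (i : Int)).getD 0)]
  rw [PySem.List.foldl_append_singleton_eq_map, PySem.List.foldl_add]
  simp only [pyGetD_natD, List.nil_append, zero_add]
  rw [map_getD_range]

theorem countP_build (ft : List Int) :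
    ((List.range ft.length).map (fun i : Nat => ((i : Int) + 1, ft.getD i 0))).countP
      (fun x => decide (0 < x.2)) = ft.countP (fun t => decide (0 < t)) := by
  rw [List.countP_map]
  conv_rhs => rw [← map_getD_range ft 0, List.countP_map]
  rfl

theorem solution_spec : Claim_equal_solution := by
  intro ft k _ hpre
  show solution ft k = solution_alt ft k
  rw [solution, solution_alt]
  rw [build_eq]
  simp only [PySem.List.pyRange_zero_natCast, List.map_map]
  simp only [Function.comp_def, pyGetD_natD]
  by_cases hks : k ≥ ft.sum
  · rw [if_pos hks, if_pos hks]
  · rw [if_neg hks, if_neg hks]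
    set bl := (List.range ft.length).map (fun i : Nat => ((i : Int) + 1, ft.getD i 0)) with hbl
    set sf := PySem.List.sorted bl (fun x => x.2) with hsf
    have hlen : sf.length = ft.length := by
      simp [hsf, hbl, PySem.List.length_sorted]
    have hcnt : sf.countP (fun x => decide (0 < x.2)) = ft.countP (fun t => decide (0 < t)) := by
      rw [((PySem.List.sorted_perm bl (fun x => x.2) false)).countP_eq, hbl, countP_build]
    have hinv : 0 ≤ k ∨ ((0 : Int) = 0 ∧ ((sf.drop 0).countP (fun x => decide (0 < x.2)) = 0 ∨
        -(((sf.drop 0).countP (fun x => decide (0 < x.2)) : Int)) ≤ k)) := by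
      by_cases hk0 : 0 ≤ k
      · exact Or.inl hk0
      · refine Or.inr ⟨rfl, ?_⟩
        rw [List.drop_zero, hcnt]
        by_cases hc0 : ft.countP (fun t => decide (0 < t)) = 0
        · exact Or.inl hc0
        · right
          unfold Pre_solution at hpre
          push Not at hpre
          have := hpre (by omega) (by omega)
          omega
    have := loop_eq sf (PySem.List.sorted_pairwise bl (fun x => x.2)) sf.length 0
      (by omega) (by omega) k 0 hinv
    simp only [Nat.cast_zero] at this
    rw [hlen] at this
    exact this
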